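-- pv_equiv track=rewrite | github.com/Reidmcc/here-i-am | backend/app/services/session_manager.py | _build_memory_queries
-- ===== SOURCE A (Python) =====
-- from typing import Dict, List, Set, Optional, Any, AsyncIterator, Callable, Tuple
--
-- def _build_memory_queries(
--     conversation_context: List[Dict[str, str]],
--     current_message: Optional[str],
-- ) -> Tuple[Optional[str], Optional[str]]:
--     """
--     Build separate query texts for memory similarity search.
--
--     Returns separate queries for the user message and the most recent AI response,
--     allowing independent retrieval from each that can then be combined.
--
--     Args:
--         conversation_context: The conversation history
--         current_message: The current human message (can be None for continuations)
--
--     Returns: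
--         Tuple of (user_query, assistant_query) - either can be None if not available
--     """
--     # Find the most recent assistant message
--     last_assistant_content = None
--     for msg in reversed(conversation_context):
--         if msg.get("role") == "assistant":
--             last_assistant_content = msg.get("content", "")
--             break
--
--     # Handle continuation (no current message) - use last assistant message only
--     if not current_message:
--         if last_assistant_content:
--             return (None, last_assistant_content)
--         # Fallback to last user message if no assistant message
--         for msg in reversed(conversation_context):
--             if msg.get("role") == "user":
--                 return (msg.get("content", ""), None)
--         return (None, None)
--
--     # Return both queries separately
--     return (current_message, last_assistant_content)
-- ===== SOURCE B (Python) =====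
-- def _build_memory_queries(conversation_context, current_message):
--     # Staged decomposition: first project the conversation into two content lists
--     # (one per role), then answer every case from their last elements.
--     assistants = [m.get("content", "") for m in conversation_context
--                   if m.get("role") == "assistant"]
--     users = [m.get("content", "") for m in conversation_context
--              if m.get("role") == "user"]
--     last_assistant = assistants[-1] if assistants else None
--     if current_message:
--         return (current_message, last_assistant)
--     if last_assistant:
--         return (None, last_assistant)
--     if users:
--         return (users[-1], None)
--     return (None, None)
-- ===== Notes on version B (the rewrite author's own statement) =====
-- stated objective: alternative
-- what changed: Replaces A's two short-circuited reverse scans by a staged decomposition: project the conversation into per-role content lists via comprehensions, then answer all cases from the last elements of those lists, with the branches in positive (truthy-first) order.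
import Mathlib
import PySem

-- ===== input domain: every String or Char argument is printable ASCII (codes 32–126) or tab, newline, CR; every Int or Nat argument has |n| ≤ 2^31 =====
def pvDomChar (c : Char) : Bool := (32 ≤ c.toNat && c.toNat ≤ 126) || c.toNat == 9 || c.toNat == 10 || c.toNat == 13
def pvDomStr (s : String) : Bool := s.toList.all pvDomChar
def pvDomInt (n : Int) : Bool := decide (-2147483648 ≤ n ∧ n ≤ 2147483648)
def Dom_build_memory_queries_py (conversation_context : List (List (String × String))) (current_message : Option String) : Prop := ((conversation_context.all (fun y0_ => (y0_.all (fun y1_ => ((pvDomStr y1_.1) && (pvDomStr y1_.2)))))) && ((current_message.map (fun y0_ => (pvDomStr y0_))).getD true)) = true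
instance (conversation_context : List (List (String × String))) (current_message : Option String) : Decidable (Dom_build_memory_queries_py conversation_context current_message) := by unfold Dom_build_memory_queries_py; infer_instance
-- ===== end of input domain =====

-- B replaces A's two short-circuited reverse scans by a staged decomposition
-- (build per-role content lists, then read their last elements); same cost,
-- different structure (objective: alternative).

-- ===== PORT A =====
-- Python truthiness of an Optional[str]
def pvTruthy : Option String → Bool
  | none => false
  | some s => !(s == "")

-- 'for msg in reversed(ctx): if msg.get("role") == role: return msg.get("content",""); break'
-- (applied to an already-reversed list; first match wins)
def pvFirstRoleContent (role : String) : List (List (String × String)) → Option String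
  | [] => none
  | m :: rest =>
    if (PySem.Dict.ofList m).get? "role" == some role
    then some ((PySem.Dict.ofList m).getD "content" "")
    else pvFirstRoleContent role rest

def build_memory_queries_py (conversation_context : List (List (String × String))) (current_message : Option String) : Option String × Option String :=
  let last_assistant_content := pvFirstRoleContent "assistant" conversation_context.reverse
  if !(pvTruthy current_message) then
    if pvTruthy last_assistant_content then (none, last_assistant_content)
    else
      match pvFirstRoleContent "user" conversation_context.reverse with
      | some c => (some c, none)
      | none => (none, none)
  else (current_message, last_assistant_content)

-- ===== PORT B =====
-- '[m.get("content","") for m in ctx if m.get("role") == role]'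
def pvRoleContents (role : String) (ctx : List (List (String × String))) : List String :=
  (ctx.filter (fun m => (PySem.Dict.ofList m).get? "role" == some role)).map
    (fun m => (PySem.Dict.ofList m).getD "content" "")

def build_memory_queries_py_alt (conversation_context : List (List (String × String))) (current_message : Option String) : Option String × Option String :=
  let assistants := pvRoleContents "assistant" conversation_context
  let users := pvRoleContents "user" conversation_context
  let last_assistant := assistants.getLast?
  if (current_message.getD "") ≠ "" then (current_message, last_assistant)
  else if (last_assistant.getD "") ≠ "" then (none, last_assistant)
  else
    match users.getLast? with
    | some u => (some u, none)
    | none => (none, none)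

-- ===== PRECONDITION & SPEC =====
def Spec_build_memory_queries_py (conversation_context : List (List (String × String))) (current_message : Option String) (out : Option String × Option String) : Prop := out = build_memory_queries_py_alt conversation_context current_message
instance (conversation_context : List (List (String × String))) (current_message : Option String) (out : Option String × Option String) : Decidable (Spec_build_memory_queries_py conversation_context current_message out) := by unfold Spec_build_memory_queries_py; infer_instance

-- ===== CLAIM =====
def Claim_equal_build_memory_queries_py : Prop := ∀ (conversation_context : List (List (String × String))) (current_message : Option String), Dom_build_memory_queries_py conversation_context current_message → Spec_build_memory_queries_py conversation_context current_message (build_memory_queries_py conversation_context current_message)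

-- ===== LEMMAS AND PROOFS =====

-- A's first-match reverse scan is the head of B's filtered/mapped list
lemma pvFirst_eq_head (r : String) (l : List (List (String × String))) :
    pvFirstRoleContent r l = (pvRoleContents r l).head? := by
  induction l with
  | nil => simp [pvFirstRoleContent, pvRoleContents]
  | cons m l ih =>
    simp only [pvFirstRoleContent, pvRoleContents, List.filter_cons]
    split_ifs with h <;> simp_all [pvRoleContents]

lemma pvFirst_reverse (r : String) (l : List (List (String × String))) :
    pvFirstRoleContent r l.reverse = (pvRoleContents r l).getLast? := by
  rw [pvFirst_eq_head]
  simp [pvRoleContents, List.filter_reverse, List.map_reverse, List.head?_reverse]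

lemma pvTruthy_eq (o : Option String) : pvTruthy o = ((o.getD "") ≠ "" : Bool) := by
  cases o with
  | none => simp [pvTruthy]
  | some s => by_cases h : s = "" <;> simp [pvTruthy, h]

theorem build_memory_queries_py_spec : Claim_equal_build_memory_queries_py := by
  intro ctx cm _
  unfold Spec_build_memory_queries_py build_memory_queries_py build_memory_queries_py_alt
  simp only [pvFirst_reverse, pvTruthy_eq]
  by_cases h1 : (cm.getD "") = "" <;> by_cases h2 : (((pvRoleContents "assistant" ctx).getLast?).getD "") = "" <;>
    simp [h1, h2]
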